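-- pv_equiv track=rewrite | github.com/glebonaut/GB_Python_Seminar | HW5/HW5.py | display_field
-- ===== SOURCE A (Python) =====
-- def display_field(field):
--     string = "\n"
--     j = 0
--     for i in range(9):
--         string += field[i] + "\t"
--         if j % 3 == 2 and i != 8:
--             string += "\n\n"
--             j = -1
--         j += 1
--     string += "\n"
--     return string
-- ===== SOURCE B (Python) =====
-- def display_field(field):
--     rows = ["".join(field[i] + "\t" for i in range(r * 3, r * 3 + 3))
--             for r in range(3)]
--     return "\n" + "\n\n".join(rows) + "\n"
-- ===== Notes on version B (the rewrite author's own statement) =====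
-- stated objective: simpler
-- what changed: Replaces the flat 9-step loop with a modular counter that inline-inserts row separators by structural chunking: build three row strings (three tab-terminated cells each) and join them with '\n\n' between a leading and trailing '\n'.
import Mathlib
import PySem

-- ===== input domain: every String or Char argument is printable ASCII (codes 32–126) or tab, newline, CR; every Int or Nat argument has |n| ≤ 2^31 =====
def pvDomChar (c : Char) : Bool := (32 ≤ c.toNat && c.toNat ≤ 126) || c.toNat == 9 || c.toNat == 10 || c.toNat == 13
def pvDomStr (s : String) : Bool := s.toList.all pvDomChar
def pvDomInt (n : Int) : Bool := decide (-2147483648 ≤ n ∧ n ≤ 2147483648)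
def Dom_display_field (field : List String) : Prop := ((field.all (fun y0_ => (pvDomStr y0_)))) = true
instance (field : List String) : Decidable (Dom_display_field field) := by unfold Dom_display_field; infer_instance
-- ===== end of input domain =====

-- B replaces the counter-driven flat loop with row chunking and a single join (simpler decomposition).


-- ===== PORT A =====
-- field[i] is PySem.List.pyGet?; Pre_ guarantees it is some, so .getD "" is never the raising case inside Pre_.
def display_field (field : List String) : String :=
  (((PySem.List.pyRange 0 9 1).foldl (fun (st : String × Int) (i : Int) =>
      let s := st.1 ++ (PySem.List.pyGet? field i).getD "" ++ "\t"
      let st' : String × Int :=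
        if PySem.Int.mod st.2 3 = 2 ∧ i ≠ 8 then (s ++ "\n\n", -1) else (s, st.2)
      (st'.1, st'.2 + 1)) ("\n", 0)).1) ++ "\n"

-- ===== PORT B =====
def display_field_alt (field : List String) : String :=
  let rows := (PySem.List.pyRange 0 3 1).map (fun r =>
    PySem.Str.join "" ((PySem.List.pyRange (r * 3) (r * 3 + 3) 1).map
      (fun i => (PySem.List.pyGet? field i).getD "" ++ "\t")))
  "\n" ++ PySem.Str.join "\n\n" rows ++ "\n"

-- ===== PRECONDITION & SPEC =====
-- Pre_ excludes fields with fewer than 9 cells, on which both Pythons raise IndexError.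
def Pre_display_field (field : List String) : Prop := 9 ≤ field.length
instance (field : List String) : Decidable (Pre_display_field field) := by unfold Pre_display_field; infer_instance
def pvWitness_display_field : List String := ["X", "O", " ", "1", "2", "3", "a", "b", "c"]
def Spec_display_field (field : List String) (out : String) : Prop := out = display_field_alt field
instance (field : List String) (out : String) : Decidable (Spec_display_field field out) := by unfold Spec_display_field; infer_instance

-- ===== CLAIM (what is proved, stated in full; the proofs are below) =====
def Claim_equal_display_field : Prop := ∀ (field : List String), Dom_display_field field → Pre_display_field field → Spec_display_field field (display_field field)

-- ===== LEMMAS AND PROOFS =====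

-- ===== VERDICT (by name: the statement is the Claim_ definition above) =====
theorem display_field_spec : Claim_equal_display_field := by
  intro field _ hpre
  unfold Pre_display_field at hpre
  match field, hpre with
  | a :: b :: c :: d :: e :: f :: g :: h :: i :: rest, _ =>
    show display_field _ = display_field_alt _
    have e1 : PySem.List.pyGet? (a :: b :: c :: d :: e :: f :: g :: h :: i :: rest) 1 = some b := by
      rw [show (1:Int) = ((1:Nat):Int) from rfl, PySem.List.pyGet?_natCast]; rfl
    have e2 : PySem.List.pyGet? (a :: b :: c :: d :: e :: f :: g :: h :: i :: rest) 2 = some c := by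
      rw [show (2:Int) = ((2:Nat):Int) from rfl, PySem.List.pyGet?_natCast]; rfl
    have e3 : PySem.List.pyGet? (a :: b :: c :: d :: e :: f :: g :: h :: i :: rest) 3 = some d := by
      rw [show (3:Int) = ((3:Nat):Int) from rfl, PySem.List.pyGet?_natCast]; rfl
    have e4 : PySem.List.pyGet? (a :: b :: c :: d :: e :: f :: g :: h :: i :: rest) 4 = some e := by
      rw [show (4:Int) = ((4:Nat):Int) from rfl, PySem.List.pyGet?_natCast]; rfl
    have e5 : PySem.List.pyGet? (a :: b :: c :: d :: e :: f :: g :: h :: i :: rest) 5 = some f := by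
      rw [show (5:Int) = ((5:Nat):Int) from rfl, PySem.List.pyGet?_natCast]; rfl
    have e6 : PySem.List.pyGet? (a :: b :: c :: d :: e :: f :: g :: h :: i :: rest) 6 = some g := by
      rw [show (6:Int) = ((6:Nat):Int) from rfl, PySem.List.pyGet?_natCast]; rfl
    have e7 : PySem.List.pyGet? (a :: b :: c :: d :: e :: f :: g :: h :: i :: rest) 7 = some h := by
      rw [show (7:Int) = ((7:Nat):Int) from rfl, PySem.List.pyGet?_natCast]; rfl
    have e8 : PySem.List.pyGet? (a :: b :: c :: d :: e :: f :: g :: h :: i :: rest) 8 = some i := by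
      rw [show (8:Int) = ((8:Nat):Int) from rfl, PySem.List.pyGet?_natCast]; rfl
    simp only [display_field, display_field_alt]
    rw [← String.toList_inj]
    norm_num [PySem.List.pyRange_one_cons, PySem.List.pyRange_one_eq_nil,
      PySem.Int.mod, PySem.Str.join, e1, e2, e3, e4, e5, e6, e7, e8,
      (by decide : Int.fmod 0 3 = 0), (by decide : Int.fmod 1 3 = 1),
      (by decide : Int.fmod 2 3 = 2), PySem.Chars.join_cons_cons,
      PySem.Chars.join_singleton, String.toList_append]
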